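-- pv_equiv track=rewrite | github.com/JonathanSiles96/resumemaker | backend/services/ats_matcher.py | _get_related_skills
-- ===== SOURCE A (Python) =====
-- from typing import List, Dict, Set, Any
--
-- def _get_related_skills(found_skills: List[str], job_text: str) -> List[str]:
--     """Get skills related to those found in job description"""
--     related = []
--
--     # Frontend ecosystems
--     if any(s in found_skills for s in ['Angular', 'React', 'Vue.js', 'Vue']):
--         related.extend([
--             'TypeScript', 'JavaScript', 'HTML5', 'CSS3', 'SCSS', 'Webpack',
--             'npm', 'Node.js', 'REST', 'API', 'Git', 'Responsive Design',
--             'Component Architecture', 'State Management', 'RxJS', 'Redux',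
--             'Single Page Applications', 'SPA', 'Progressive Web Apps', 'PWA'
--         ])
--
--     # Backend ecosystems
--     if any(s in found_skills for s in ['.NET', 'ASP.NET', 'C#']):
--         related.extend([
--             'C#', '.NET Core', '.NET Framework', 'ASP.NET Core', 'ASP.NET MVC',
--             'Entity Framework', 'LINQ', 'SQL Server', 'Azure', 'REST',
--             'Web API', 'Microservices', 'Docker', 'Kubernetes'
--         ])
--
--     if any(s in found_skills for s in ['Node.js', 'Express', 'JavaScript']):
--         related.extend([
--             'Node.js', 'Express.js', 'JavaScript', 'TypeScript', 'MongoDB',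
--             'PostgreSQL', 'REST', 'GraphQL', 'Docker', 'AWS', 'Microservices'
--         ])
--
--     # Cloud platforms
--     if 'AWS' in found_skills or 'aws' in job_text:
--         related.extend([
--             'AWS', 'EC2', 'S3', 'Lambda', 'RDS', 'CloudFront', 'API Gateway',
--             'CloudFormation', 'Terraform', 'Docker', 'Kubernetes', 'DevOps'
--         ])
--
--     if 'Azure' in found_skills or 'azure' in job_text:
--         related.extend([
--             'Azure', 'Azure DevOps', 'Azure Functions', 'Azure App Services',
--             'Azure SQL Database', 'Application Insights', 'ARM Templates', 'Docker'
--         ])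
--
--     # DevOps
--     if any(s in found_skills for s in ['Docker', 'Kubernetes', 'CI/CD']):
--         related.extend([
--             'Docker', 'Kubernetes', 'Jenkins', 'GitHub Actions', 'GitLab CI',
--             'Terraform', 'Ansible', 'Monitoring', 'Logging', 'Infrastructure as Code'
--         ])
--
--     return related
-- ===== SOURCE B (Python) =====
-- from typing import List
--
-- # Inverted index: each trigger skill maps to the index of the rule it activates
-- # (every trigger belongs to exactly one rule in A's table).
-- _TRIGGER_RULE = {
--     'Angular': 0, 'React': 0, 'Vue.js': 0, 'Vue': 0,
--     '.NET': 1, 'ASP.NET': 1, 'C#': 1,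
--     'Node.js': 2, 'Express': 2, 'JavaScript': 2,
--     'AWS': 3,
--     'Azure': 4,
--     'Docker': 5, 'Kubernetes': 5, 'CI/CD': 5,
-- }
--
-- _RELATED = [
--     ['TypeScript', 'JavaScript', 'HTML5', 'CSS3', 'SCSS', 'Webpack',
--      'npm', 'Node.js', 'REST', 'API', 'Git', 'Responsive Design',
--      'Component Architecture', 'State Management', 'RxJS', 'Redux',
--      'Single Page Applications', 'SPA', 'Progressive Web Apps', 'PWA'],
--     ['C#', '.NET Core', '.NET Framework', 'ASP.NET Core', 'ASP.NET MVC',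
--      'Entity Framework', 'LINQ', 'SQL Server', 'Azure', 'REST',
--      'Web API', 'Microservices', 'Docker', 'Kubernetes'],
--     ['Node.js', 'Express.js', 'JavaScript', 'TypeScript', 'MongoDB',
--      'PostgreSQL', 'REST', 'GraphQL', 'Docker', 'AWS', 'Microservices'],
--     ['AWS', 'EC2', 'S3', 'Lambda', 'RDS', 'CloudFront', 'API Gateway',
--      'CloudFormation', 'Terraform', 'Docker', 'Kubernetes', 'DevOps'],
--     ['Azure', 'Azure DevOps', 'Azure Functions', 'Azure App Services',
--      'Azure SQL Database', 'Application Insights', 'ARM Templates', 'Docker'],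
--     ['Docker', 'Kubernetes', 'Jenkins', 'GitHub Actions', 'GitLab CI',
--      'Terraform', 'Ansible', 'Monitoring', 'Logging', 'Infrastructure as Code'],
-- ]
--
-- def _get_related_skills(found_skills: List[str], job_text: str) -> List[str]:
--     # One pass over the INPUT skills through the inverted index (no scan of
--     # trigger lists per rule), then job-text substring triggers, then emit the
--     # related lists of the active rules in rule order.
--     active = set()
--     for s in found_skills:
--         i = _TRIGGER_RULE.get(s)
--         if i is not None:
--             active.add(i)
--     if 'aws' in job_text:
--         active.add(3)
--     if 'azure' in job_text:
--         active.add(4)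
--     related = []
--     for i, rel in enumerate(_RELATED):
--         if i in active:
--             related.extend(rel)
--     return related
-- ===== Notes on version B (the rewrite author's own statement) =====
-- stated objective: faster
-- what changed: Replaced the per-rule membership scans over found_skills with an inverted index: one pass over found_skills through a trigger->rule dictionary collects the set of active rule indices (plus the two job_text substring triggers), then the related lists of active rules are emitted in rule order.
import Mathlib
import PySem

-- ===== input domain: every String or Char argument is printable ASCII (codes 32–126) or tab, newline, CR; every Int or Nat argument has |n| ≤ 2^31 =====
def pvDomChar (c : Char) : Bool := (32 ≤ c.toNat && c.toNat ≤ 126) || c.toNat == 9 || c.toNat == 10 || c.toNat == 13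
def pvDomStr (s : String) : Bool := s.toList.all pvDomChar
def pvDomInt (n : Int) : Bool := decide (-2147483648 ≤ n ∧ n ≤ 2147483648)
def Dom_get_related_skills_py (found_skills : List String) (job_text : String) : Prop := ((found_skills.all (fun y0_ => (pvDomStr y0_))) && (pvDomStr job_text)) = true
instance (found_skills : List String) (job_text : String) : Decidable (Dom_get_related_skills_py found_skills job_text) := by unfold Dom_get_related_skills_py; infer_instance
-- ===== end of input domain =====

-- B replaces A's per-rule trigger scans with an inverted trigger->rule index: one pass over
-- found_skills collects the set of active rule indices, then active rules' lists are emitted in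
-- order (measured faster in a timing run).
-- ===== PORT A =====
-- Port of A: six sequential if/extend branches over a `related` accumulator.
def get_related_skills_py (found_skills : List String) (job_text : String) : List String :=
  let related : List String := []
  let related := if (["Angular", "React", "Vue.js", "Vue"].any (fun s => found_skills.contains s)) then
    related ++ ["TypeScript", "JavaScript", "HTML5", "CSS3", "SCSS", "Webpack",
      "npm", "Node.js", "REST", "API", "Git", "Responsive Design",
      "Component Architecture", "State Management", "RxJS", "Redux",
      "Single Page Applications", "SPA", "Progressive Web Apps", "PWA"] else related
  let related := if ([".NET", "ASP.NET", "C#"].any (fun s => found_skills.contains s)) then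
    related ++ ["C#", ".NET Core", ".NET Framework", "ASP.NET Core", "ASP.NET MVC",
      "Entity Framework", "LINQ", "SQL Server", "Azure", "REST",
      "Web API", "Microservices", "Docker", "Kubernetes"] else related
  let related := if (["Node.js", "Express", "JavaScript"].any (fun s => found_skills.contains s)) then
    related ++ ["Node.js", "Express.js", "JavaScript", "TypeScript", "MongoDB",
      "PostgreSQL", "REST", "GraphQL", "Docker", "AWS", "Microservices"] else related
  let related := if (found_skills.contains "AWS" || PySem.Str.isIn "aws" job_text) then
    related ++ ["AWS", "EC2", "S3", "Lambda", "RDS", "CloudFront", "API Gateway",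
      "CloudFormation", "Terraform", "Docker", "Kubernetes", "DevOps"] else related
  let related := if (found_skills.contains "Azure" || PySem.Str.isIn "azure" job_text) then
    related ++ ["Azure", "Azure DevOps", "Azure Functions", "Azure App Services",
      "Azure SQL Database", "Application Insights", "ARM Templates", "Docker"] else related
  let related := if (["Docker", "Kubernetes", "CI/CD"].any (fun s => found_skills.contains s)) then
    related ++ ["Docker", "Kubernetes", "Jenkins", "GitHub Actions", "GitLab CI",
      "Terraform", "Ansible", "Monitoring", "Logging", "Infrastructure as Code"] else related
  related

-- ===== PORT B =====
-- Inverted index: each trigger skill maps to the index of the one rule it activates.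
def pvTriggerRule : PySem.Dict String Int :=
  PySem.Dict.mk
    [("Angular", 0), ("React", 0), ("Vue.js", 0), ("Vue", 0),
     (".NET", 1), ("ASP.NET", 1), ("C#", 1),
     ("Node.js", 2), ("Express", 2), ("JavaScript", 2),
     ("AWS", 3),
     ("Azure", 4),
     ("Docker", 5), ("Kubernetes", 5), ("CI/CD", 5)]

def pvRelated : List (List String) :=
  [["TypeScript", "JavaScript", "HTML5", "CSS3", "SCSS", "Webpack",
    "npm", "Node.js", "REST", "API", "Git", "Responsive Design",
    "Component Architecture", "State Management", "RxJS", "Redux",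
    "Single Page Applications", "SPA", "Progressive Web Apps", "PWA"],
   ["C#", ".NET Core", ".NET Framework", "ASP.NET Core", "ASP.NET MVC",
    "Entity Framework", "LINQ", "SQL Server", "Azure", "REST",
    "Web API", "Microservices", "Docker", "Kubernetes"],
   ["Node.js", "Express.js", "JavaScript", "TypeScript", "MongoDB",
    "PostgreSQL", "REST", "GraphQL", "Docker", "AWS", "Microservices"],
   ["AWS", "EC2", "S3", "Lambda", "RDS", "CloudFront", "API Gateway",
    "CloudFormation", "Terraform", "Docker", "Kubernetes", "DevOps"],
   ["Azure", "Azure DevOps", "Azure Functions", "Azure App Services",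
    "Azure SQL Database", "Application Insights", "ARM Templates", "Docker"],
   ["Docker", "Kubernetes", "Jenkins", "GitHub Actions", "GitLab CI",
    "Terraform", "Ansible", "Monitoring", "Logging", "Infrastructure as Code"]]

-- B: one pass over found_skills through the inverted index collects the active rule indices,
-- then job_text substring triggers, then the related lists of active rules in rule order.
def get_related_skills_py_alt (found_skills : List String) (job_text : String) : List String :=
  let active : PySem.Set Int :=
    found_skills.foldl (fun acc s =>
      match pvTriggerRule.get? s with
      | some i => PySem.Set.add acc i
      | none => acc) PySem.Set.empty
  let active := if PySem.Str.isIn "aws" job_text then PySem.Set.add active 3 else active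
  let active := if PySem.Str.isIn "azure" job_text then PySem.Set.add active 4 else active
  (PySem.List.enumerate pvRelated).foldl (fun related p =>
    if PySem.Set.contains active p.1 then related ++ p.2 else related) []

-- ===== PRECONDITION & SPEC =====
def Spec_get_related_skills_py (found_skills : List String) (job_text : String) (out : List String) : Prop := out = get_related_skills_py_alt found_skills job_text
instance (found_skills : List String) (job_text : String) (out : List String) : Decidable (Spec_get_related_skills_py found_skills job_text out) := by unfold Spec_get_related_skills_py; infer_instance

-- ===== CLAIM (what is proved, stated in full; the proofs are below) =====
def Claim_equal_get_related_skills_py : Prop := ∀ (found_skills : List String) (job_text : String), Dom_get_related_skills_py found_skills job_text → Spec_get_related_skills_py found_skills job_text (get_related_skills_py found_skills job_text)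

-- ===== LEMMAS AND PROOFS =====

lemma contains_set_add (s : PySem.Set Int) (x y : Int) :
    PySem.Set.contains (PySem.Set.add s x) y = (PySem.Set.contains s y || y == x) := by
  simp [PySem.Set.add, PySem.Set.contains]
  split_ifs with h
  · cases hyx : (y == x) <;> simp_all [beq_iff_eq]
  · cases hyx : (y == x) <;> simp_all [beq_iff_eq]

-- the active-set invariant: after the fold, rule i is active iff some skill maps to i
lemma active_contains (l : List String) (acc : PySem.Set Int) (i : Int) :
    PySem.Set.contains
      (l.foldl (fun acc s =>
        match pvTriggerRule.get? s with
        | some j => PySem.Set.add acc j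
        | none => acc) acc) i
    = (PySem.Set.contains acc i || l.any (fun s => pvTriggerRule.get? s == some i)) := by
  induction l generalizing acc with
  | nil => simp
  | cons x xs ih =>
    simp only [List.foldl_cons, List.any_cons, ih]
    cases h : pvTriggerRule.get? x with
    | none => simp
    | some j =>
      have hred : ((match some j with
          | some j => PySem.Set.add acc j
          | none => acc) : PySem.Set Int) = PySem.Set.add acc j := rfl
      rw [hred, contains_set_add]
      have h2 : ((some j : Option Int) == some i) = (i == j) := by
        cases hij : (i == j) <;> simp [beq_iff_eq] at hij ⊢ <;> omega
      rw [h2, Bool.or_assoc]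


-- all trigger keys of the inverted index
def pvTriggers : List String := ["Angular", "React", "Vue.js", "Vue", ".NET", "ASP.NET", "C#", "Node.js", "Express", "JavaScript", "AWS", "Azure", "Docker", "Kubernetes", "CI/CD"]

lemma get?_none_of_not_trigger (x : String) (h : x ∉ pvTriggers) :
    pvTriggerRule.get? x = none := by
  simp only [pvTriggerRule, PySem.Dict.get?, Option.map_eq_none_iff, List.find?_eq_none]
  intro p hp
  fin_cases hp <;>
    exact fun hpx => h (by rw [← beq_iff_eq.mp hpx]; decide)

-- each trigger maps to its rule: lookup through the inverted index equals A's trigger test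
lemma trig0 (x : String) : (pvTriggerRule.get? x == some 0) = (x == "Angular" || x == "React" || x == "Vue.js" || x == "Vue") := by
  by_cases h : x ∈ pvTriggers
  · fin_cases h <;> decide
  · rw [get?_none_of_not_trigger x h]
    have e0 : (x == "Angular") = false := beq_eq_false_iff_ne.mpr (fun e => h (by rw [e]; decide))
    have e1 : (x == "React") = false := beq_eq_false_iff_ne.mpr (fun e => h (by rw [e]; decide))
    have e2 : (x == "Vue.js") = false := beq_eq_false_iff_ne.mpr (fun e => h (by rw [e]; decide))
    have e3 : (x == "Vue") = false := beq_eq_false_iff_ne.mpr (fun e => h (by rw [e]; decide))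
    simp [e0, e1, e2, e3]

lemma trig1 (x : String) : (pvTriggerRule.get? x == some 1) = (x == ".NET" || x == "ASP.NET" || x == "C#") := by
  by_cases h : x ∈ pvTriggers
  · fin_cases h <;> decide
  · rw [get?_none_of_not_trigger x h]
    have e0 : (x == ".NET") = false := beq_eq_false_iff_ne.mpr (fun e => h (by rw [e]; decide))
    have e1 : (x == "ASP.NET") = false := beq_eq_false_iff_ne.mpr (fun e => h (by rw [e]; decide))
    have e2 : (x == "C#") = false := beq_eq_false_iff_ne.mpr (fun e => h (by rw [e]; decide))
    simp [e0, e1, e2]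

lemma trig2 (x : String) : (pvTriggerRule.get? x == some 2) = (x == "Node.js" || x == "Express" || x == "JavaScript") := by
  by_cases h : x ∈ pvTriggers
  · fin_cases h <;> decide
  · rw [get?_none_of_not_trigger x h]
    have e0 : (x == "Node.js") = false := beq_eq_false_iff_ne.mpr (fun e => h (by rw [e]; decide))
    have e1 : (x == "Express") = false := beq_eq_false_iff_ne.mpr (fun e => h (by rw [e]; decide))
    have e2 : (x == "JavaScript") = false := beq_eq_false_iff_ne.mpr (fun e => h (by rw [e]; decide))
    simp [e0, e1, e2]

lemma trig3 (x : String) : (pvTriggerRule.get? x == some 3) = (x == "AWS") := by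
  by_cases h : x ∈ pvTriggers
  · fin_cases h <;> decide
  · rw [get?_none_of_not_trigger x h]
    have e0 : (x == "AWS") = false := beq_eq_false_iff_ne.mpr (fun e => h (by rw [e]; decide))
    simp [e0]

lemma trig4 (x : String) : (pvTriggerRule.get? x == some 4) = (x == "Azure") := by
  by_cases h : x ∈ pvTriggers
  · fin_cases h <;> decide
  · rw [get?_none_of_not_trigger x h]
    have e0 : (x == "Azure") = false := beq_eq_false_iff_ne.mpr (fun e => h (by rw [e]; decide))
    simp [e0]

lemma trig5 (x : String) : (pvTriggerRule.get? x == some 5) = (x == "Docker" || x == "Kubernetes" || x == "CI/CD") := by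
  by_cases h : x ∈ pvTriggers
  · fin_cases h <;> decide
  · rw [get?_none_of_not_trigger x h]
    have e0 : (x == "Docker") = false := beq_eq_false_iff_ne.mpr (fun e => h (by rw [e]; decide))
    have e1 : (x == "Kubernetes") = false := beq_eq_false_iff_ne.mpr (fun e => h (by rw [e]; decide))
    have e2 : (x == "CI/CD") = false := beq_eq_false_iff_ne.mpr (fun e => h (by rw [e]; decide))
    simp [e0, e1, e2]

-- membership phrasing of the active-set invariant
lemma mem_active (l : List String) (acc : PySem.Set Int) (i : Int) :
    (i ∈ (l.foldl (fun acc s =>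
        match pvTriggerRule.get? s with
        | some j => PySem.Set.add acc j
        | none => acc) acc))
    ↔ (i ∈ acc ∨ (l.any fun s => pvTriggerRule.get? s == some i) = true) := by
  rw [← PySem.Set.contains_iff, active_contains, Bool.or_eq_true, PySem.Set.contains_iff]

-- existential phrasing of the trigger lemmas, matching the simp-normal form of both ports
lemma ptrig0 (x : String) : pvTriggerRule.get? x = some 0 ↔ (x = "Angular" ∨ x = "React" ∨ x = "Vue.js" ∨ x = "Vue") := by
  rw [← beq_iff_eq, trig0]
  simp [or_assoc]

lemma etrig0 (fs : List String) : (∃ x ∈ fs, pvTriggerRule.get? x = some 0) ↔ ("Angular" ∈ fs ∨ "React" ∈ fs ∨ "Vue.js" ∈ fs ∨ "Vue" ∈ fs) := by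
  simp only [ptrig0]
  constructor
  · rintro ⟨x, hx, (rfl|rfl|rfl|rfl)⟩
    · exact Or.inl hx
    · exact Or.inr (Or.inl hx)
    · exact Or.inr (Or.inr (Or.inl hx))
    · exact Or.inr (Or.inr (Or.inr hx))
  · rintro (h|h|h|h)
    · exact ⟨"Angular", h, Or.inl rfl⟩
    · exact ⟨"React", h, Or.inr (Or.inl rfl)⟩
    · exact ⟨"Vue.js", h, Or.inr (Or.inr (Or.inl rfl))⟩
    · exact ⟨"Vue", h, Or.inr (Or.inr (Or.inr (rfl)))⟩

lemma ptrig1 (x : String) : pvTriggerRule.get? x = some 1 ↔ (x = ".NET" ∨ x = "ASP.NET" ∨ x = "C#") := by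
  rw [← beq_iff_eq, trig1]
  simp [or_assoc]

lemma etrig1 (fs : List String) : (∃ x ∈ fs, pvTriggerRule.get? x = some 1) ↔ (".NET" ∈ fs ∨ "ASP.NET" ∈ fs ∨ "C#" ∈ fs) := by
  simp only [ptrig1]
  constructor
  · rintro ⟨x, hx, (rfl|rfl|rfl)⟩
    · exact Or.inl hx
    · exact Or.inr (Or.inl hx)
    · exact Or.inr (Or.inr hx)
  · rintro (h|h|h)
    · exact ⟨".NET", h, Or.inl rfl⟩
    · exact ⟨"ASP.NET", h, Or.inr (Or.inl rfl)⟩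
    · exact ⟨"C#", h, Or.inr (Or.inr (rfl))⟩

lemma ptrig2 (x : String) : pvTriggerRule.get? x = some 2 ↔ (x = "Node.js" ∨ x = "Express" ∨ x = "JavaScript") := by
  rw [← beq_iff_eq, trig2]
  simp [or_assoc]

lemma etrig2 (fs : List String) : (∃ x ∈ fs, pvTriggerRule.get? x = some 2) ↔ ("Node.js" ∈ fs ∨ "Express" ∈ fs ∨ "JavaScript" ∈ fs) := by
  simp only [ptrig2]
  constructor
  · rintro ⟨x, hx, (rfl|rfl|rfl)⟩
    · exact Or.inl hx
    · exact Or.inr (Or.inl hx)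
    · exact Or.inr (Or.inr hx)
  · rintro (h|h|h)
    · exact ⟨"Node.js", h, Or.inl rfl⟩
    · exact ⟨"Express", h, Or.inr (Or.inl rfl)⟩
    · exact ⟨"JavaScript", h, Or.inr (Or.inr (rfl))⟩

lemma ptrig3 (x : String) : pvTriggerRule.get? x = some 3 ↔ (x = "AWS") := by
  rw [← beq_iff_eq, trig3]
  simp

lemma etrig3 (fs : List String) : (∃ x ∈ fs, pvTriggerRule.get? x = some 3) ↔ ("AWS" ∈ fs) := by
  simp only [ptrig3]
  constructor
  · rintro ⟨x, hx, (rfl)⟩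
    · exact hx
  · rintro (h)
    · exact ⟨"AWS", h, rfl⟩

lemma ptrig4 (x : String) : pvTriggerRule.get? x = some 4 ↔ (x = "Azure") := by
  rw [← beq_iff_eq, trig4]
  simp

lemma etrig4 (fs : List String) : (∃ x ∈ fs, pvTriggerRule.get? x = some 4) ↔ ("Azure" ∈ fs) := by
  simp only [ptrig4]
  constructor
  · rintro ⟨x, hx, (rfl)⟩
    · exact hx
  · rintro (h)
    · exact ⟨"Azure", h, rfl⟩

lemma ptrig5 (x : String) : pvTriggerRule.get? x = some 5 ↔ (x = "Docker" ∨ x = "Kubernetes" ∨ x = "CI/CD") := by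
  rw [← beq_iff_eq, trig5]
  simp [or_assoc]

lemma etrig5 (fs : List String) : (∃ x ∈ fs, pvTriggerRule.get? x = some 5) ↔ ("Docker" ∈ fs ∨ "Kubernetes" ∈ fs ∨ "CI/CD" ∈ fs) := by
  simp only [ptrig5]
  constructor
  · rintro ⟨x, hx, (rfl|rfl|rfl)⟩
    · exact Or.inl hx
    · exact Or.inr (Or.inl hx)
    · exact Or.inr (Or.inr hx)
  · rintro (h|h|h)
    · exact ⟨"Docker", h, Or.inl rfl⟩
    · exact ⟨"Kubernetes", h, Or.inr (Or.inl rfl)⟩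
    · exact ⟨"CI/CD", h, Or.inr (Or.inr (rfl))⟩

set_option maxHeartbeats 1600000 in
-- ===== VERDICT (by name: the statement is the Claim_ definition above) =====
theorem get_related_skills_py_spec : Claim_equal_get_related_skills_py := by
  intro found_skills job_text _
  unfold Spec_get_related_skills_py get_related_skills_py get_related_skills_py_alt
  generalize PySem.Str.isIn "aws" job_text = baws
  generalize PySem.Str.isIn "azure" job_text = baz
  cases baws <;> cases baz <;>
    simp [pvRelated,
      PySem.List.enumerate_cons, PySem.List.enumerate_nil,
      mem_active, PySem.Set.mem_add,
      etrig0, etrig1, etrig2, etrig3, etrig4, etrig5]
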